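-- pv_equiv track=rewrite | github.com/nick442/local_rag_system | src/query_reformulation.py | _generate_domain_variants
-- ===== SOURCE A (Python) =====
-- from typing import List, Dict, Any, Optional
--
-- def _generate_domain_variants(query: str) -> List[str]:
--     """Generate domain-specific query variants."""
--     variants = []
--
--     # Detect potential domains
--     ml_terms = ['learning', 'model', 'algorithm', 'neural', 'training', 'data']
--     tech_terms = ['system', 'software', 'code', 'programming', 'computer']
--     science_terms = ['method', 'analysis', 'research', 'study', 'experiment']
--
--     query_lower = query.lower()
--
--     # Add domain-specific context
--     if any(term in query_lower for term in ml_terms):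
--         variants.extend([
--             f"{query} in machine learning",
--             f"{query} algorithm",
--             f"{query} model"
--         ])
--
--     if any(term in query_lower for term in tech_terms):
--         variants.extend([
--             f"{query} implementation",
--             f"{query} technology",
--             f"{query} development"
--         ])
--
--     if any(term in query_lower for term in science_terms):
--         variants.extend([
--             f"{query} methodology",
--             f"{query} approach",
--             f"{query} technique"
--         ])
--
--     return variants[:3]  # Limit variants
-- ===== SOURCE B (Python) =====
-- def _generate_domain_variants(query: str) -> list:
--     """Generate domain-specific query variants (table-driven, first match wins)."""
--     table = [
--         (['learning', 'model', 'algorithm', 'neural', 'training', 'data'],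
--          [f"{query} in machine learning", f"{query} algorithm", f"{query} model"]),
--         (['system', 'software', 'code', 'programming', 'computer'],
--          [f"{query} implementation", f"{query} technology", f"{query} development"]),
--         (['method', 'analysis', 'research', 'study', 'experiment'],
--          [f"{query} methodology", f"{query} approach", f"{query} technique"]),
--     ]
--     query_lower = query.lower()
--     for keywords, variants in table:
--         if any(k in query_lower for k in keywords):
--             return variants
--     return []
-- ===== Notes on version B (the rewrite author's own statement) =====
-- stated objective: simpler
-- what changed: Replaces three unrolled if-extend blocks plus a [:3] slice with a single table of (keywords, variants) entries scanned once, returning the first matching entry's variants (the slice made later matches dead code).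
import Mathlib
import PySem

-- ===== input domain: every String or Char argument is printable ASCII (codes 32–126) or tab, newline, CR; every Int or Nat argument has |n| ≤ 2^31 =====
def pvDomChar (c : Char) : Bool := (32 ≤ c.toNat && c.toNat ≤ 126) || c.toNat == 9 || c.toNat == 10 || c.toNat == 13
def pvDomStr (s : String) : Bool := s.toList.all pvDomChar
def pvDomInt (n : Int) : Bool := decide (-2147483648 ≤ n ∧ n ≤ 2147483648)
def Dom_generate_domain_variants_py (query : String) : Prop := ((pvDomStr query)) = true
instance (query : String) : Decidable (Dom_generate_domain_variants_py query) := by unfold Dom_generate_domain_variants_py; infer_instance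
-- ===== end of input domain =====

-- ===== PORT A =====
-- B changes only the decomposition: one (keywords, variants) table scanned with first-match
-- early return, instead of A's three if-extend blocks followed by a [:3] slice.
-- shared helper: any(term in ql for term in terms)
def gdvAnyIn (terms : List String) (ql : String) : Bool :=
  terms.any (fun t => PySem.Str.isIn t ql)

def generate_domain_variants_py (query : String) : List String :=
  let variants : List String := []
  let ml_terms := ["learning", "model", "algorithm", "neural", "training", "data"]
  let tech_terms := ["system", "software", "code", "programming", "computer"]
  let science_terms := ["method", "analysis", "research", "study", "experiment"]
  let query_lower := PySem.Str.lower query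
  let variants := if gdvAnyIn ml_terms query_lower then
      variants ++ [query ++ " in machine learning", query ++ " algorithm", query ++ " model"]
    else variants
  let variants := if gdvAnyIn tech_terms query_lower then
      variants ++ [query ++ " implementation", query ++ " technology", query ++ " development"]
    else variants
  let variants := if gdvAnyIn science_terms query_lower then
      variants ++ [query ++ " methodology", query ++ " approach", query ++ " technique"]
    else variants
  PySem.List.slice variants none (some 3)

-- ===== PORT B =====
-- first entry of the table whose keywords match; [] if none
def gdvFirstMatch (ql : String) : List (List String × List String) → List String
  | [] => []
  | (kws, vs) :: rest => if gdvAnyIn kws ql then vs else gdvFirstMatch ql rest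

def generate_domain_variants_py_alt (query : String) : List String :=
  gdvFirstMatch (PySem.Str.lower query)
    [(["learning", "model", "algorithm", "neural", "training", "data"],
      [query ++ " in machine learning", query ++ " algorithm", query ++ " model"]),
     (["system", "software", "code", "programming", "computer"],
      [query ++ " implementation", query ++ " technology", query ++ " development"]),
     (["method", "analysis", "research", "study", "experiment"],
      [query ++ " methodology", query ++ " approach", query ++ " technique"])]

-- ===== PRECONDITION & SPEC =====
def Spec_generate_domain_variants_py (query : String) (out : List String) : Prop := out = generate_domain_variants_py_alt query
instance (query : String) (out : List String) : Decidable (Spec_generate_domain_variants_py query out) := by unfold Spec_generate_domain_variants_py; infer_instance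

-- ===== CLAIM (what is proved, stated in full; the proofs are below) =====
def Claim_equal_generate_domain_variants_py : Prop := ∀ (query : String), Dom_generate_domain_variants_py query → Spec_generate_domain_variants_py query (generate_domain_variants_py query)

-- ===== LEMMAS AND PROOFS =====

-- ===== VERDICT (by name: the statement is the Claim_ definition above) =====
theorem generate_domain_variants_py_spec : Claim_equal_generate_domain_variants_py := by
  intro query _
  unfold Spec_generate_domain_variants_py generate_domain_variants_py generate_domain_variants_py_alt
  by_cases h1 : gdvAnyIn ["learning", "model", "algorithm", "neural", "training", "data"] (PySem.Str.lower query) <;>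
  by_cases h2 : gdvAnyIn ["system", "software", "code", "programming", "computer"] (PySem.Str.lower query) <;>
  by_cases h3 : gdvAnyIn ["method", "analysis", "research", "study", "experiment"] (PySem.Str.lower query) <;>
    simp [gdvFirstMatch, h1, h2, h3, PySem.List.slice_to, List.take]
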